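-- pv_equiv track=rewrite | github.com/gnified/wxWidgets | build/get_bakefile_list.py | get_set_files
-- ===== SOURCE A (Python) =====
-- def get_set_files(sets, var):
--     files = []
--     for file in sets[var]:
--         if file.startswith('${'):
--             setname = file[2:-1]
--             files.extend(get_set_files(sets, setname))
--         else:
--             files.append(file)
--     return files
-- ===== SOURCE B (Python) =====
-- def get_set_files(sets, var):
--     stack = list(reversed(sets[var]))
--     files = []
--     while stack:
--         item = stack.pop()
--         if item.startswith('${'):
--             stack.extend(reversed(sets[item[2:-1]]))
--         else:
--             files.append(item)
--     return files
-- ===== Notes on version B (the rewrite author's own statement) =====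
-- stated objective: alternative
-- what changed: The recursive pre-order expansion is replaced by an iterative explicit-stack loop (children pushed in reverse, popped from the top), removing Python recursion entirely while producing the identical pre-order file list.
import Mathlib
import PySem

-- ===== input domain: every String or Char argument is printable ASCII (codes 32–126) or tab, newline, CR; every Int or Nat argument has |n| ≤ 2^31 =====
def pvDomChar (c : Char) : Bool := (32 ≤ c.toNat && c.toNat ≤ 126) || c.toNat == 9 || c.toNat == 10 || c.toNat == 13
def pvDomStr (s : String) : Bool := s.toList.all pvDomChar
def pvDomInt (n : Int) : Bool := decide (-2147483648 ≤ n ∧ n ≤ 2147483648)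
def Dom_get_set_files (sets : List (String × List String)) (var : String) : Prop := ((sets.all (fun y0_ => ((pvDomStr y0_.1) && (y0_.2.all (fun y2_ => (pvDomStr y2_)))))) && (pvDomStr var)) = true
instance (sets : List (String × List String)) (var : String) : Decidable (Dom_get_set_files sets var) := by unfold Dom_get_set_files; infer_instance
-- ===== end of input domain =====

-- B replaces A's recursive pre-order expansion by an explicit-stack iteration (alternative decomposition, same cost, same output).


-- ===== PORT A =====
def pvRef (item : String) : Bool := PySem.Str.startswith item "${"          -- item.startswith('${')
def pvInner (item : String) : String := PySem.Str.slice item (some 2) (some (-1))   -- item[2:-1]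
-- sets[name] (Python dict lookup; KeyError is excluded by Pre_, so the default [] is never read there)
def pvLookup (sets : List (String × List String)) (name : String) : List String :=
  (PySem.Dict.mk sets).getD name []

-- the 'for file in sets[var]' loop of A, with 'rec' standing for the recursive call
def pvLoopA (rec : String → List String) : List String → List String → List String
  | [], files => files
  | file :: rest, files =>
    if pvRef file then
      pvLoopA rec rest (files ++ rec (pvInner file))
    else
      pvLoopA rec rest (files ++ [file])

-- A with a fuel counter: a totality guard only — under Pre_ the recursion depth is at most sets.length
def pvGoA : Nat → List (String × List String) → String → List String
  | 0, _, _ => []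
  | fuel + 1, sets, var => pvLoopA (pvGoA fuel sets) (pvLookup sets var) []

def get_set_files (sets : List (String × List String)) (var : String) : List String :=
  pvGoA (sets.length + 1) sets var

-- ===== PORT B =====
-- weight of one stack item = number of loop iterations it causes (fuel-bounded; used only for B's totality guard)
def pvW : Nat → List (String × List String) → String → Nat
  | 0, _, _ => 1
  | fuel + 1, sets, item =>
    if pvRef item then
      1 + ((pvLookup sets (pvInner item)).map (pvW fuel sets)).sum
    else 1

-- B's while loop.  The Lean list stores the Python stack TOP-FIRST (Python keeps it reversed and
-- pops from the end), so 'stack.extend(reversed(sets[setname]))' is prepending the items in order.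
-- The fuel is a totality guard only: under Pre_ it exceeds the number of iterations, never exhausted.
def pvGoB : Nat → List (String × List String) → List String → List String → List String
  | 0, _, _, files => files
  | fuel + 1, sets, stack, files =>
    match stack with
    | [] => files
    | item :: rest =>
      if pvRef item then
        pvGoB fuel sets (pvLookup sets (pvInner item) ++ rest) files
      else
        pvGoB fuel sets rest (files ++ [item])

def get_set_files_alt (sets : List (String × List String)) (var : String) : List String :=
  pvGoB (((pvLookup sets var).map (pvW (sets.length + 1) sets)).sum + 1) sets (pvLookup sets var) []

-- ===== PRECONDITION & SPEC =====
def pvHas (sets : List (String × List String)) (name : String) : Bool :=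
  ((PySem.Dict.mk sets).get? name).isSome

-- pvOkB k sets name = 'expanding name terminates within depth k': name is a key of sets and every
-- '${...}' item in its set is recursively ok at depth k-1.  Any terminating expansion chain visits
-- distinct keys, so depth sets.length certifies every input on which A returns.
def pvOkB : Nat → List (String × List String) → String → Bool
  | 0, _, _ => false
  | k + 1, sets, name =>
    pvHas sets name &&
      (pvLookup sets name).all (fun item => !pvRef item || pvOkB k sets (pvInner item))

-- Pre_ holds EXACTLY when the Python A returns normally: every set name reached while expanding var
-- is a key of sets (otherwise A raises KeyError) and the references reachable from var are acyclic
-- (otherwise A recurses forever / raises RecursionError); nothing on which A returns is excluded.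
def Pre_get_set_files (sets : List (String × List String)) (var : String) : Prop :=
  pvOkB sets.length sets var = true

instance (sets : List (String × List String)) (var : String) : Decidable (Pre_get_set_files sets var) := by
  unfold Pre_get_set_files; infer_instance

def pvWitness_get_set_files : (List (String × List String)) × String :=
  ([("a", ["f1", "${b}", "f2"]), ("b", ["g"])], "a")

def Spec_get_set_files (sets : List (String × List String)) (var : String) (out : List String) : Prop := out = get_set_files_alt sets var
instance (sets : List (String × List String)) (var : String) (out : List String) : Decidable (Spec_get_set_files sets var out) := by unfold Spec_get_set_files; infer_instance

-- ===== CLAIM (what is proved, stated in full; the proofs are below) =====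
def Claim_equal_get_set_files : Prop := ∀ (sets : List (String × List String)) (var : String), Dom_get_set_files sets var → Pre_get_set_files sets var → Spec_get_set_files sets var (get_set_files sets var)

-- ===== LEMMAS AND PROOFS =====

-- the one-item expansion both programs produce, expressed with A's fueled recursion
def pvExp (sets : List (String × List String)) (item : String) : List String :=
  if pvRef item then pvGoA (sets.length + 1) sets (pvInner item) else [item]

lemma pvOkB_elim {k : Nat} {sets : List (String × List String)} {name : String}
    (h : pvOkB (k + 1) sets name = true) :
    ∀ item ∈ pvLookup sets name, pvRef item = true → pvOkB k sets (pvInner item) = true := by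
  simp only [pvOkB, Bool.and_eq_true, List.all_eq_true, Bool.or_eq_true, Bool.not_eq_true'] at h
  intro item hm hr
  rcases h.2 item hm with h' | h'
  · rw [hr] at h'; cases h'
  · exact h'

lemma pvOkB_succ (sets : List (String × List String)) :
    ∀ k name, pvOkB k sets name = true → pvOkB (k + 1) sets name = true := by
  intro k
  induction k with
  | zero => intro name h; simp [pvOkB] at h
  | succ j ih =>
    intro name h
    have h1 : pvHas sets name = true := by
      simp only [pvOkB, Bool.and_eq_true] at h; exact h.1
    have h2 := pvOkB_elim h
    show (pvHas sets name &&
      (pvLookup sets name).all (fun item => !pvRef item || pvOkB (j + 1) sets (pvInner item))) = true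
    simp only [Bool.and_eq_true, List.all_eq_true, Bool.or_eq_true, Bool.not_eq_true', h1, true_and]
    intro item hm
    by_cases hr : pvRef item = true
    · exact Or.inr (ih _ (h2 item hm hr))
    · exact Or.inl (by simpa using hr)

lemma pvOkB_le (sets : List (String × List String)) :
    ∀ m k name, k ≤ m → pvOkB k sets name = true → pvOkB m sets name = true := by
  intro m
  induction m with
  | zero =>
    intro k name hk h
    have hz : k = 0 := Nat.le_zero.mp hk
    exact hz ▸ h
  | succ j ih =>
    intro k name hk h
    by_cases he : k = j + 1
    · simpa [he] using h
    · exact pvOkB_succ sets j name (ih k name (by omega) h)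

lemma pvLoopA_congr (rec₁ rec₂ : String → List String) (l : List String)
    (h : ∀ item ∈ l, pvRef item = true → rec₁ (pvInner item) = rec₂ (pvInner item)) :
    ∀ files, pvLoopA rec₁ l files = pvLoopA rec₂ l files := by
  induction l with
  | nil => intro files; rfl
  | cons x t ih =>
    intro files
    by_cases hx : pvRef x = true
    · have := h x (by simp) hx
      simp only [pvLoopA, hx, if_pos]
      rw [this]
      exact ih (fun item hm => h item (by simp [hm])) _
    · simp only [pvLoopA, hx, Bool.false_eq_true, not_false_iff, if_neg]
      exact ih (fun item hm => h item (by simp [hm])) _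

lemma pvLoopA_flatMap (rec : String → List String) (l : List String) :
    ∀ files, pvLoopA rec l files =
      files ++ l.flatMap (fun item => if pvRef item = true then rec (pvInner item) else [item]) := by
  induction l with
  | nil => intro files; simp [pvLoopA]
  | cons x t ih =>
    intro files
    by_cases hx : pvRef x = true
    · simp [pvLoopA, hx, ih]
    · simp [pvLoopA, hx, ih]

lemma pvGoA_stab (sets : List (String × List String)) :
    ∀ k f₁ f₂ name, pvOkB k sets name = true → k ≤ f₁ → k ≤ f₂ →
      pvGoA f₁ sets name = pvGoA f₂ sets name := by
  intro k
  induction k with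
  | zero => intro f₁ f₂ name h _ _; simp [pvOkB] at h
  | succ j ih =>
    intro f₁ f₂ name h h1 h2
    obtain ⟨g₁, rfl⟩ : ∃ g, f₁ = g + 1 := ⟨f₁ - 1, by omega⟩
    obtain ⟨g₂, rfl⟩ : ∃ g, f₂ = g + 1 := ⟨f₂ - 1, by omega⟩
    show pvLoopA (pvGoA g₁ sets) (pvLookup sets name) [] =
      pvLoopA (pvGoA g₂ sets) (pvLookup sets name) []
    apply pvLoopA_congr
    intro item hm hr
    exact ih g₁ g₂ (pvInner item) (pvOkB_elim h item hm hr) (by omega) (by omega)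

lemma pvGoA_unfold (sets : List (String × List String)) (k : Nat) (name : String)
    (h : pvOkB k sets name = true) (hk : k ≤ sets.length) :
    pvGoA (sets.length + 1) sets name = (pvLookup sets name).flatMap (pvExp sets) := by
  obtain ⟨j, rfl⟩ : ∃ j, k = j + 1 := by
    cases k with
    | zero => simp [pvOkB] at h
    | succ j => exact ⟨j, rfl⟩
  show pvLoopA (pvGoA sets.length sets) (pvLookup sets name) [] = _
  rw [pvLoopA_congr (pvGoA sets.length sets) (pvGoA (sets.length + 1) sets) _
      (fun item hm hr =>
        pvGoA_stab sets j _ _ _ (pvOkB_elim h item hm hr) (by omega) (by omega)) []]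
  rw [pvLoopA_flatMap]
  rfl

lemma pvW_nonref (f : Nat) (sets : List (String × List String)) (item : String)
    (h : pvRef item = false) : pvW f sets item = 1 := by
  cases f with
  | zero => rfl
  | succ g => simp [pvW, h]

lemma pvW_pos (f : Nat) (sets : List (String × List String)) (item : String) :
    1 ≤ pvW f sets item := by
  cases f with
  | zero => simp [pvW]
  | succ g => simp only [pvW]; split <;> omega

lemma pvW_stab (sets : List (String × List String)) :
    ∀ k f₁ f₂ item,
      (pvRef item = true → pvOkB k sets (pvInner item) = true ∧ k ≤ f₁ ∧ k ≤ f₂) →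
      pvW f₁ sets item = pvW f₂ sets item := by
  intro k
  induction k with
  | zero =>
    intro f₁ f₂ item hc
    by_cases hr : pvRef item = true
    · have := (hc hr).1; simp [pvOkB] at this
    · rw [pvW_nonref _ _ _ (by simpa using hr), pvW_nonref _ _ _ (by simpa using hr)]
  | succ j ih =>
    intro f₁ f₂ item hc
    by_cases hr : pvRef item = true
    · obtain ⟨hok, h1, h2⟩ := hc hr
      obtain ⟨g₁, rfl⟩ : ∃ g, f₁ = g + 1 := ⟨f₁ - 1, by omega⟩
      obtain ⟨g₂, rfl⟩ : ∃ g, f₂ = g + 1 := ⟨f₂ - 1, by omega⟩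
      simp only [pvW, hr, if_pos]
      congr 1
      refine congrArg List.sum (List.map_congr_left ?_)
      intro x hx
      apply ih
      intro hrx
      exact ⟨pvOkB_elim hok x hx hrx, by omega, by omega⟩
    · rw [pvW_nonref _ _ _ (by simpa using hr), pvW_nonref _ _ _ (by simpa using hr)]

lemma pvW_unfold (sets : List (String × List String)) (item : String)
    (hr : pvRef item = true) (h : pvOkB sets.length sets (pvInner item) = true) :
    pvW (sets.length + 1) sets item =
      1 + ((pvLookup sets (pvInner item)).map (pvW (sets.length + 1) sets)).sum := by
  obtain ⟨j, hj⟩ : ∃ j, sets.length = j + 1 := by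
    cases hL : sets.length with
    | zero => rw [hL] at h; simp [pvOkB] at h
    | succ j => exact ⟨j, rfl⟩
  have h0 : pvW (sets.length + 1) sets item =
      1 + ((pvLookup sets (pvInner item)).map (pvW sets.length sets)).sum := by
    simp only [pvW, hr, if_pos]
  rw [h0]
  congr 1
  refine congrArg List.sum (List.map_congr_left ?_)
  intro x hx
  apply pvW_stab sets j
  intro hrx
  exact ⟨pvOkB_elim (hj ▸ h) x hx hrx, by omega, by omega⟩

lemma pvGoB_spec (sets : List (String × List String)) :
    ∀ n stack files,
      (∀ item ∈ stack, pvRef item = true → pvOkB sets.length sets (pvInner item) = true) →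
      (stack.map (pvW (sets.length + 1) sets)).sum < n →
      pvGoB n sets stack files = files ++ stack.flatMap (pvExp sets) := by
  intro n
  induction n with
  | zero => intro stack files _ h; omega
  | succ m ih =>
    intro stack files hok hsum
    match stack with
    | [] => simp [pvGoB]
    | item :: rest =>
      by_cases hr : pvRef item = true
      · have hok1 := hok item (by simp) hr
        obtain ⟨j, hj⟩ : ∃ j, sets.length = j + 1 := by
          cases hL : sets.length with
          | zero => rw [hL] at hok1; simp [pvOkB] at hok1
          | succ j => exact ⟨j, rfl⟩
        have hchild : ∀ x ∈ pvLookup sets (pvInner item), pvRef x = true →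
            pvOkB sets.length sets (pvInner x) = true := by
          intro x hx hrx
          exact pvOkB_le sets sets.length j (pvInner x) (by omega)
            (pvOkB_elim (hj ▸ hok1) x hx hrx)
        simp only [pvGoB, hr, if_pos]
        rw [ih (pvLookup sets (pvInner item) ++ rest) files
            (by
              intro x hx hrx
              rcases List.mem_append.mp hx with hx | hx
              · exact hchild x hx hrx
              · exact hok x (by simp [hx]) hrx)
            (by
              have hw := pvW_unfold sets item hr hok1
              simp only [List.map_cons, List.sum_cons, hw] at hsum
              simp only [List.map_append, List.sum_append]
              omega)]
        have hexp : pvExp sets item = (pvLookup sets (pvInner item)).flatMap (pvExp sets) := by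
          simp only [pvExp, hr, if_pos]
          exact pvGoA_unfold sets sets.length (pvInner item) hok1 (le_refl _)
        simp [hexp, List.flatMap_append]
      · simp only [pvGoB, hr, Bool.false_eq_true, not_false_iff, if_neg]
        rw [ih rest (files ++ [item])
            (fun x hx hrx => hok x (by simp [hx]) hrx)
            (by
              have := pvW_pos (sets.length + 1) sets item
              simp only [List.map_cons, List.sum_cons] at hsum
              omega)]
        have : pvExp sets item = [item] := by simp [pvExp, hr]
        simp [this]

-- ===== VERDICT (by name: the statement is the Claim_ definition above) =====
theorem get_set_files_spec : Claim_equal_get_set_files := by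
  intro sets var _hdom hpre
  have hok : pvOkB sets.length sets var = true := hpre
  show get_set_files sets var = get_set_files_alt sets var
  unfold get_set_files get_set_files_alt
  obtain ⟨j, hj⟩ : ∃ j, sets.length = j + 1 := by
    cases hL : sets.length with
    | zero => rw [hL] at hok; simp [pvOkB] at hok
    | succ j => exact ⟨j, rfl⟩
  rw [pvGoA_unfold sets sets.length var hok (le_refl _)]
  rw [pvGoB_spec sets _ (pvLookup sets var) []
      (fun item hm hr =>
        pvOkB_le sets sets.length j (pvInner item) (by omega)
          (pvOkB_elim (hj ▸ hok) item hm hr))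
      (by omega)]
  simp
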